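-- pv_equiv track=rewrite | github.com/wcmchenry3-stack/gaming_app | backend/sort/verify_levels.py | _moves
-- ===== SOURCE A (Python) =====
-- DEPTH = 4
--
-- def _top_color(bottle: list[str]) -> str | None:
--     return bottle[-1] if bottle else None
--
-- def _space(bottle: list[str]) -> int:
--     return DEPTH - len(bottle)
--
-- def _moves(state: list[list[str]]) -> list[tuple[int, int]]:
--     result = []
--     for i, src in enumerate(state):
--         if not src:
--             continue
--         color = src[-1]
--         for j, dst in enumerate(state):
--             if i == j or _space(dst) == 0:
--                 continue
--             top_j = _top_color(dst)
--             if top_j is None or top_j == color: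
--                 result.append((i, j))
--     return result
-- ===== SOURCE B (Python) =====
-- DEPTH = 4
--
-- def _moves(state):
--     # Build once: indices of empty bottles, and a color -> indices map of
--     # non-full bottles whose top is that color.
--     empties = []
--     by_color = {}
--     for j, b in enumerate(state):
--         if len(b) == DEPTH:
--             continue
--         if not b:
--             empties.append(j)
--         else:
--             by_color.setdefault(b[-1], []).append(j)
--     result = []
--     for i, src in enumerate(state):
--         if not src:
--             continue
--         cand = sorted(empties + by_color.get(src[-1], []))
--         result.extend((i, j) for j in cand if j != i)
--     return result
-- ===== Notes on version B (the rewrite author's own statement) =====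
-- stated objective: alternative
-- what changed: Instead of rescanning all bottles for every source, B builds once a list of empty-bottle indices plus a dict mapping each top color to the indices of non-full bottles with that top, then per source merges and sorts the two candidate index lists and filters out the source itself.
import Mathlib
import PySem

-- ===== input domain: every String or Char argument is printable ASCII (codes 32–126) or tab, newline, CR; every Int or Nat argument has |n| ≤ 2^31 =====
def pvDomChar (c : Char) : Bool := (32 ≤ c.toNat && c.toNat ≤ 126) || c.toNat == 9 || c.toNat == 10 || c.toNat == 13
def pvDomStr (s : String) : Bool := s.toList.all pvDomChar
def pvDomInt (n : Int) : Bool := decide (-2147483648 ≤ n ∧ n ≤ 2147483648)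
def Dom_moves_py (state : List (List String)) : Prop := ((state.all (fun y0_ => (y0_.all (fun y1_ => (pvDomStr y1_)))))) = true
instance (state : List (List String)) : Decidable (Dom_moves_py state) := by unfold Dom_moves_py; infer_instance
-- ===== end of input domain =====

-- B replaces A's inner rescan of all bottles by a once-built index (empty bottles + a
-- top-color → non-full-bottle-indices dict) whose per-source merge is sorted; alternative
-- decomposition, same results.

-- ===== PORT A =====
-- _top_color: bottle[-1] if bottle else None
def top_color_py (bottle : List String) : Option String :=
  if bottle = [] then none else PySem.List.pyGet? bottle (-1)

-- _space: DEPTH - len(bottle)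
def space_py (bottle : List String) : Int := 4 - (bottle.length : Int)

-- literal port of _moves; color = src[-1] is guarded by src ≠ [], so .getD "" never fires
def moves_py (state : List (List String)) : List (Int × Int) :=
  (PySem.List.enumerate state).foldl (fun result p =>
    if p.2 = [] then result
    else
      let color := (PySem.List.pyGet? p.2 (-1)).getD ""
      (PySem.List.enumerate state).foldl (fun r q =>
        if p.1 = q.1 ∨ space_py q.2 = 0 then r
        else
          let topj := top_color_py q.2
          if topj = none ∨ topj = some color then r ++ [(p.1, q.1)] else r) result) []

-- ===== PORT B =====
-- b[-1] of a non-empty bottle (the dict key / source color in Source B)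
def topD_py (b : List String) : String := (PySem.List.pyGet? b (-1)).getD ""

-- literal port of Source B: first loop builds (empties, by_color); by_color.setdefault(k,[]).append(j)
-- is Dict.modify k [] (· ++ [j]); second loop sorts empties + by_color.get(...) and extends result
def moves_py_alt (state : List (List String)) : List (Int × Int) :=
  let idx := (PySem.List.enumerate state).foldl
    (fun (acc : List Int × PySem.Dict String (List Int)) p =>
      if p.2.length = 4 then acc
      else if p.2 = [] then (acc.1 ++ [p.1], acc.2)
      else (acc.1, acc.2.modify (topD_py p.2) [] (· ++ [p.1])))
    ([], PySem.Dict.empty)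
  (PySem.List.enumerate state).foldl (fun result p =>
    if p.2 = [] then result
    else
      let cand := PySem.List.sorted (idx.1 ++ idx.2.getD (topD_py p.2) []) (fun x => x) false
      result ++ (cand.filter (fun j => j ≠ p.1)).map (fun j => (p.1, j))) []

-- ===== PRECONDITION & SPEC =====
def Spec_moves_py (state : List (List String)) (out : List (Int × Int)) : Prop := out = moves_py_alt state
instance (state : List (List String)) (out : List (Int × Int)) : Decidable (Spec_moves_py state out) := by unfold Spec_moves_py; infer_instance

-- ===== CLAIM (what is proved, stated in full; the proofs are below) =====
def Claim_equal_moves_py : Prop := ∀ (state : List (List String)), Dom_moves_py state → Spec_moves_py state (moves_py state)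

-- ===== LEMMAS AND PROOFS =====

-- predicates for the destination test, on enumerated (index, bottle) pairs
def pE (p : Int × List String) : Bool := p.2.isEmpty
def pC (c : String) (p : Int × List String) : Bool :=
  !p.2.isEmpty && p.2.length != 4 && (topD_py p.2 == c)
def pQ (c : String) (p : Int × List String) : Bool := pE p || pC c p

-- invariant of B's first loop
theorem loop1_inv (l : List (Int × List String)) (E : List Int)
    (D : PySem.Dict String (List Int)) :
    (l.foldl (fun (acc : List Int × PySem.Dict String (List Int)) p =>
      if p.2.length = 4 then acc
      else if p.2 = [] then (acc.1 ++ [p.1], acc.2)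
      else (acc.1, acc.2.modify (topD_py p.2) [] (· ++ [p.1]))) (E, D)).1
      = E ++ (l.filter pE).map (·.1)
    ∧ ∀ c, (l.foldl (fun (acc : List Int × PySem.Dict String (List Int)) p =>
      if p.2.length = 4 then acc
      else if p.2 = [] then (acc.1 ++ [p.1], acc.2)
      else (acc.1, acc.2.modify (topD_py p.2) [] (· ++ [p.1]))) (E, D)).2.getD c []
      = D.getD c [] ++ (l.filter (pC c)).map (·.1) := by
  induction l generalizing E D with
  | nil => simp
  | cons x xs ih =>
    by_cases h4 : x.2.length = 4
    · have he : x.2 ≠ [] := by intro h; rw [h] at h4; simp at h4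
      simp [List.foldl_cons, h4, pE, pC, List.isEmpty_iff, he, ih]
    · by_cases he : x.2 = []
      · simp only [List.foldl_cons, if_neg h4, if_pos he]
        refine ⟨?_, ?_⟩
        · rw [(ih _ _).1]; simp [pE, he]
        · intro c
          rw [(ih _ _).2 c]
          simp [pC, he]
      · simp only [List.foldl_cons, if_neg h4, if_neg he]
        refine ⟨?_, ?_⟩
        · rw [(ih _ _).1]; simp [pE, he]
        · intro c
          rw [(ih _ _).2 c, PySem.Dict.getD_modify]
          by_cases hc : c = topD_py x.2
          · simp [pC, hc, he, h4]
          · have hcx : pC c x = false := by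
              simp [pC, topD_py]
              intro _ _ h
              exact absurd h.symm hc
            simp [hcx, hc]

-- the two disjoint filtered lists permute into the single filter
theorem filter_split_perm (l : List (Int × List String)) (c : String) :
    (l.filter pE ++ l.filter (pC c)).Perm (l.filter (pQ c)) := by
  induction l with
  | nil => simp
  | cons x xs ih =>
    by_cases he : pE x
    · have hc : pC c x = false := by
        simp only [pE, pC] at *; simp [he]
      simp only [List.filter_cons, hc, pQ, Bool.or_eq_true, he, if_pos]
      simpa using ih.cons x
    · by_cases hcc : pC c x
      · simp only [List.filter_cons, he, hcc, pQ]
        simp only [Bool.false_eq_true, if_pos, Bool.or_eq_true,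
          or_true]
        have : (List.filter pE xs ++ x :: List.filter (pC c) xs).Perm
            (x :: (List.filter pE xs ++ List.filter (pC c) xs)) := List.perm_middle
        exact this.trans (ih.cons x)
      · have hq : pQ c x = false := by simp [pQ, he, hcc]
        simp only [List.filter_cons, he, hcc, hq]
        simpa using ih

-- space_py = 0 iff length 4
theorem space_eq_zero (b : List String) : space_py b = 0 ↔ b.length = 4 := by
  unfold space_py; omega

-- destination test of A equals pQ with the extra j ≠ i conjunct
theorem destA_iff (i : Int) (c : String) (q : Int × List String) :
    (decide (¬(i = q.1 ∨ space_py q.2 = 0)) &&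
      decide (top_color_py q.2 = none ∨ top_color_py q.2 = some c))
    = (pQ c q && q.1 != i) := by
  rcases q with ⟨j, b⟩
  by_cases hij : i = j
  · simp [hij, pQ, pE, pC]
  · by_cases he : b = []
    · subst he
      simp [top_color_py, space_py, pQ, pE, hij, bne_iff_ne, Ne.symm hij]
    · have hlast : PySem.List.pyGet? b (-1) = some (b.getLast he) := by
        rw [PySem.List.pyGet?_neg_one, List.getLast?_eq_getLast_of_ne_nil he]
      by_cases h4 : b.length = 4
      · have hsp : space_py b = 0 := (space_eq_zero b).2 h4
        simp [pQ, pE, pC, he, h4, hsp, List.isEmpty_iff]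
      · have hsp : ¬ space_py b = 0 := fun h => h4 ((space_eq_zero b).1 h)
        have h1 : b.isEmpty = false := by simp [he]
        have h2 : (b.length != 4) = true := by simp [h4]
        have h3 : (j != i) = true := by simp [Ne.symm hij]
        simp [top_color_py, he, hlast, pQ, pE, pC, topD_py,
          hij, hsp, h1, h2, h3]
        by_cases hgc : b.getLast he = c <;> simp [hgc]

-- A's inner loop as a filter-map
theorem innerA (state : List (List String)) (i : Int) (c : String)
    (r : List (Int × Int)) :
    ((PySem.List.enumerate state).foldl (fun r q =>
        if i = q.1 ∨ space_py q.2 = 0 then r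
        else
          let topj := top_color_py q.2
          if topj = none ∨ topj = some c then r ++ [(i, q.1)] else r) r)
    = r ++ (((PySem.List.enumerate state).filter
        (fun q => pQ c q && q.1 != i)).map (fun q => (i, q.1))) := by
  have hbody : ∀ (r : List (Int × Int)) (q : Int × List String),
      (if i = q.1 ∨ space_py q.2 = 0 then r
        else
          let topj := top_color_py q.2
          if topj = none ∨ topj = some c then r ++ [(i, q.1)] else r)
      = (if pQ c q && q.1 != i then r ++ [(i, q.1)] else r) := by
    intro r q
    rw [← destA_iff i c q]
    by_cases h1 : i = q.1 ∨ space_py q.2 = 0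
    · simp [h1]
    · by_cases h2 : top_color_py q.2 = none ∨ top_color_py q.2 = some c
      · simp [h1, h2]
      · simp [h1, h2]
  calc ((PySem.List.enumerate state).foldl (fun r q =>
        if i = q.1 ∨ space_py q.2 = 0 then r
        else
          let topj := top_color_py q.2
          if topj = none ∨ topj = some c then r ++ [(i, q.1)] else r) r)
      = (PySem.List.enumerate state).foldl
          (fun r q => if pQ c q && q.1 != i then r ++ [(i, q.1)] else r) r := by
        apply PySem.List.foldl_congr_mem
        intro acc x _
        exact hbody acc x
    _ = _ := PySem.List.foldl_append_if _ _ _ _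

-- the sorted merged candidate list is exactly the ascending pQ-filter of indices
theorem sorted_merge_eq (state : List (List String)) (c : String) :
    PySem.List.sorted
      (((PySem.List.enumerate state).filter pE).map (·.1)
        ++ ((PySem.List.enumerate state).filter (pC c)).map (·.1))
      (fun x => x) false
    = ((PySem.List.enumerate state).filter (pQ c)).map (·.1) := by
  apply PySem.List.sorted_eq_of_perm_of_pairwise_lt
  · have := (filter_split_perm (PySem.List.enumerate state) c).map (·.1)
    rw [List.map_append] at this
    exact this.symm
  · have hp : ((PySem.List.enumerate state).filter (pQ c)).Pairwise
        (fun p q => p.1 < q.1) :=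
      (PySem.List.pairwise_lt_enumerate state 0).filter _
    rw [List.pairwise_map]
    exact hp

-- B's per-source candidate pairs equal A's
theorem block_eq (state : List (List String)) (i : Int) (c : String) :
    ((((PySem.List.enumerate state).filter (pQ c)).map (·.1)).filter
        (fun j => j ≠ i)).map (fun j => (i, j))
    = ((PySem.List.enumerate state).filter
        (fun q => pQ c q && q.1 != i)).map (fun q => (i, q.1)) := by
  rw [List.filter_map, List.map_map, List.filter_filter]
  congr 1
  apply List.filter_congr
  intro q _
  simp only [Function.comp]
  cases hq : pQ c q <;> by_cases h : q.1 = i <;> simp [h]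

-- ===== VERDICT (by name: the statement is the Claim_ definition above) =====
theorem moves_py_spec : Claim_equal_moves_py := by
  intro state _
  unfold Spec_moves_py moves_py moves_py_alt
  have h1 := loop1_inv (PySem.List.enumerate state) [] PySem.Dict.empty
  simp only [List.nil_append, PySem.Dict.getD_empty] at h1
  apply PySem.List.foldl_congr_mem
  intro acc p _
  by_cases he : p.2 = []
  · simp [he]
  · simp only [if_neg he]
    rw [innerA state p.1 _ acc]
    congr 1
    rw [h1.1, h1.2 (topD_py p.2)]
    rw [sorted_merge_eq state (topD_py p.2), block_eq]
    rfl
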